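-- pv_equiv track=rewrite | github.com/NishantKumar1301/Dsa-Pratice-Questions | Leetcode/Contest/Weekly Contest 451/ques2.py | resultingString
-- ===== SOURCE A (Python) =====
-- def resultingString(s):
--     """
--     :type s: str
--     :rtype: str
--     """
--     stack = []
--     for char in s:
--         if stack:
--             x = abs(ord(char)-ord(stack[-1]))
--             if x==1 or x==25:
--                 stack.pop()
--                 continue
--         stack.append(char)
--     return ''.join(stack)
-- ===== SOURCE B (Python) =====
-- def _remove_first(chars):
--     """Return the list with the LEFTMOST adjacent matching pair removed, or None."""
--     for i in range(len(chars) - 1):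
--         d = abs(ord(chars[i]) - ord(chars[i + 1]))
--         if d == 1 or d == 25:
--             return chars[:i] + chars[i + 2:]
--     return None
--
-- def resultingString(s):
--     chars = list(s)
--     while True:
--         nxt = _remove_first(chars)
--         if nxt is None:
--             return ''.join(chars)
--         chars = nxt
-- ===== Notes on version B (the rewrite author's own statement) =====
-- stated objective: alternative
-- what changed: Replaced the one-pass stack with a fixpoint reducer that repeatedly scans the current string for the leftmost adjacent pair differing by 1 or 25, deletes it, and restarts until no such pair remains.
import Mathlib
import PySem

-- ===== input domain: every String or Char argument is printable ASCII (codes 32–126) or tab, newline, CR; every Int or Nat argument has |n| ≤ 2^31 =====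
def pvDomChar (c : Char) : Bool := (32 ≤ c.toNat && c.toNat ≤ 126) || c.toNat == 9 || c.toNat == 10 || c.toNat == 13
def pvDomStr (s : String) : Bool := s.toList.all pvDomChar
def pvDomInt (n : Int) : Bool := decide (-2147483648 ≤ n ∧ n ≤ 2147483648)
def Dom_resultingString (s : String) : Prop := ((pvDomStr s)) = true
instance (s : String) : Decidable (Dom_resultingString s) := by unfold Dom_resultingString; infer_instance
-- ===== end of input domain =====

-- B replaces A's one-pass stack by a fixpoint reducer that repeatedly removes the
-- leftmost adjacent pair of characters whose codes differ by 1 or 25 (alternative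
-- decomposition; not faster).

-- ===== PORT A =====
-- abs(ord(a) - ord(b)) == 1 or == 25
def pvMatch (a b : Char) : Bool :=
  let d := ((a.toNat : Int) - (b.toNat : Int)).natAbs
  d == 1 || d == 25

-- one iteration of A's loop body over the stack (stack[-1] = getLast?, pop = dropLast)
def pvAStep (stack : List Char) (c : Char) : List Char :=
  match stack.getLast? with
  | some t => if pvMatch c t then stack.dropLast else stack ++ [c]
  | none => stack ++ [c]

def resultingString (s : String) : String :=
  String.mk (s.toList.foldl pvAStep [])

-- ===== PORT B =====
-- _remove_first: remove the LEFTMOST adjacent matching pair, or none if irreducible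
def pvRemoveFirst : List Char → Option (List Char)
  | a :: b :: t => if pvMatch a b then some t else (pvRemoveFirst (b :: t)).map (a :: ·)
  | _ => none

theorem pvRemoveFirst_length : ∀ (l l' : List Char), pvRemoveFirst l = some l' → l'.length + 2 = l.length := by
  intro l
  induction l with
  | nil => intro l' h; exact absurd h (by simp [pvRemoveFirst])
  | cons a t ih =>
    intro l' h
    cases t with
    | nil => exact absurd h (by simp [pvRemoveFirst])
    | cons b t' =>
      simp only [pvRemoveFirst] at h
      by_cases hm : pvMatch a b = true
      · rw [if_pos hm] at h
        cases h
        simp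
      · rw [if_neg hm] at h
        cases hr : pvRemoveFirst (b :: t') with
        | none => rw [hr] at h; cases h
        | some r =>
          rw [hr] at h
          simp only [Option.map_some] at h
          cases h
          have := ih r hr
          simp at this ⊢
          omega

-- the fixpoint loop of B
def pvReduce (l : List Char) : List Char :=
  match h : pvRemoveFirst l with
  | none => l
  | some l' => pvReduce l'
termination_by l.length
decreasing_by
  have := pvRemoveFirst_length l l' h
  omega

def resultingString_alt (s : String) : String :=
  String.mk (pvReduce s.toList)

-- ===== PRECONDITION & SPEC =====
def Spec_resultingString (s : String) (out : String) : Prop := out = resultingString_alt s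
instance (s : String) (out : String) : Decidable (Spec_resultingString s out) := by unfold Spec_resultingString; infer_instance

-- ===== CLAIM (what is proved, stated in full; the proofs are below) =====
def Claim_equal_resultingString : Prop := ∀ (s : String), Dom_resultingString s → Spec_resultingString s (resultingString s)

-- ===== LEMMAS AND PROOFS =====

theorem pvReduce_none {l : List Char} (h : pvRemoveFirst l = none) : pvReduce l = l := by
  rw [pvReduce]
  split
  · rfl
  · rename_i l'' h2; rw [h] at h2; cases h2

theorem pvReduce_some {l l' : List Char} (h : pvRemoveFirst l = some l') :
    pvReduce l = pvReduce l' := by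
  rw [pvReduce]
  split
  · rename_i h2; rw [h] at h2; cases h2
  · rename_i l'' h2
    rw [h] at h2
    cases h2
    rfl

theorem pvMatch_comm (a b : Char) : pvMatch a b = pvMatch b a := by
  simp only [pvMatch]
  have h : ((a.toNat : Int) - (b.toNat : Int)).natAbs = ((b.toNat : Int) - (a.toNat : Int)).natAbs := by
    omega
  rw [h]

-- a prefix of an irreducible list is irreducible
theorem pvIrr_prefix : ∀ (q : List Char) (t : Char),
    pvRemoveFirst (q ++ [t]) = none → pvRemoveFirst q = none := by
  intro q
  induction q with
  | nil => intro t _; rfl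
  | cons a q' ih =>
    intro t h
    cases q' with
    | nil => rfl
    | cons b q'' =>
      simp only [List.cons_append, pvRemoveFirst] at h ⊢
      by_cases hm : pvMatch a b = true
      · rw [if_pos hm] at h; cases h
      · rw [if_neg hm] at h ⊢
        rw [Option.map_eq_none_iff] at h ⊢
        exact ih t h

-- with an irreducible prefix p ending in t, the leftmost redex of p ++ c :: rest is
-- either the boundary pair (t, c) or lies inside c :: rest
theorem pvStep_irr_cons : ∀ (p : List Char) (t : Char), pvRemoveFirst p = none →
    p.getLast? = some t → ∀ (c : Char) (rest : List Char),
    pvRemoveFirst (p ++ c :: rest) =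
      if pvMatch t c = true then some (p.dropLast ++ rest)
      else (pvRemoveFirst (c :: rest)).map (p ++ ·) := by
  intro p
  induction p with
  | nil => intro t _ hl; simp at hl
  | cons a p' ih =>
    intro t hp hl c rest
    cases p' with
    | nil =>
      simp only [List.getLast?_singleton, Option.some.injEq] at hl
      rw [← hl]
      simp only [List.cons_append, List.nil_append, pvRemoveFirst]
      by_cases hm : pvMatch a c = true
      · rw [if_pos hm, if_pos hm]
        simp
      · rw [if_neg hm, if_neg hm]
    | cons b p'' =>
      simp only [pvRemoveFirst] at hp
      by_cases hab : pvMatch a b = true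
      · rw [if_pos hab] at hp; cases hp
      · rw [if_neg hab] at hp
        rw [Option.map_eq_none_iff] at hp
        have hl' : (b :: p'').getLast? = some t := by
          rw [List.getLast?_cons_cons] at hl; exact hl
        have hIH := ih t hp hl' c rest
        simp only [List.cons_append] at hIH ⊢
        simp only [pvRemoveFirst, if_neg hab]
        rw [hIH]
        by_cases hm : pvMatch t c = true
        · rw [if_pos hm, if_pos hm]
          simp [List.dropLast_cons_of_ne_nil]
        · rw [if_neg hm, if_neg hm]
          cases pvRemoveFirst (c :: rest) <;> simp

-- main invariant: running B's reducer on (irreducible stack ++ remaining input)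
-- equals running A's stack loop from that stack over the remaining input
theorem pvMain : ∀ (rest p : List Char), pvRemoveFirst p = none →
    pvReduce (p ++ rest) = List.foldl pvAStep p rest := by
  intro rest
  induction rest with
  | nil =>
    intro p hp
    simp [pvReduce_none hp]
  | cons c rest' ih =>
    intro p hp
    rw [List.foldl_cons]
    cases hl : p.getLast? with
    | none =>
      have hpe : p = [] := List.getLast?_eq_none_iff.mp hl
      subst hpe
      have h1 : pvAStep [] c = [c] := rfl
      rw [h1]
      exact ih [c] rfl
    | some t =>
      have hstep := pvStep_irr_cons p t hp hl c rest'
      by_cases hm : pvMatch t c = true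
      · -- boundary redex: the reducer removes (t, c), the stack pops
        have hA : pvAStep p c = p.dropLast := by
          simp [pvAStep, hl, pvMatch_comm c t, hm]
        rw [if_pos hm] at hstep
        rw [hA, pvReduce_some hstep]
        obtain ⟨q, x, hq⟩ := (List.eq_nil_or_concat p).resolve_left
          (by intro h; subst h; simp at hl)
        have hq' : pvRemoveFirst p.dropLast = none := by
          rw [hq, List.concat_eq_append] at hp ⊢
          simp only [List.dropLast_concat]
          exact pvIrr_prefix q x hp
        exact ih p.dropLast hq'
      · -- no boundary redex: the stack pushes c; same list, bigger irreducible prefix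
        have hA : pvAStep p c = p ++ [c] := by
          simp [pvAStep, hl, pvMatch_comm c t, hm]
        rw [hA]
        have hpc : pvRemoveFirst (p ++ [c]) = none := by
          have h0 := pvStep_irr_cons p t hp hl c []
          rw [if_neg hm] at h0
          have h2 : pvRemoveFirst ([c]) = none := rfl
          rw [h2] at h0
          simpa using h0
        have h3 : p ++ c :: rest' = (p ++ [c]) ++ rest' := by simp
        rw [h3]
        exact ih (p ++ [c]) hpc

-- ===== VERDICT (by name: the statement is the Claim_ definition above) =====
theorem resultingString_spec : Claim_equal_resultingString := by
  intro s _
  unfold Spec_resultingString resultingString resultingString_alt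
  have h := pvMain s.toList [] rfl
  simp only [List.nil_append] at h
  rw [h]
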